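-- pv_equiv track=rewrite | github.com/pypi-data/pypi-mirror-389 | packages/sollol/sollol-0.9.66.tar.gz/sollol-0.9.66/src/sollol/docker_ip_resolver.py | is_docker_ip
-- ===== SOURCE A (Python) =====
-- import ipaddress
--
-- DOCKER_IP_RANGES = [
--     "172.17.0.0/16",  # Default bridge network
--     "172.18.0.0/16",  # User-defined bridges
--     "172.19.0.0/16",
--     "172.20.0.0/16",
--     "172.21.0.0/16",
--     "172.22.0.0/16",
--     "172.23.0.0/16",
--     "172.24.0.0/16",
--     "172.25.0.0/16",
--     "172.26.0.0/16",
--     "172.27.0.0/16",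
--     "172.28.0.0/16",
--     "172.29.0.0/16",
--     "172.30.0.0/16",
--     "172.31.0.0/16",
--     "10.0.0.0/8",  # Docker swarm overlay networks
-- ]
--
-- def is_docker_ip(ip: str) -> bool:
--     """
--     Check if IP address is in Docker's internal IP ranges.
--
--     Args:
--         ip: IP address to check
--
--     Returns:
--         True if IP is likely a Docker internal IP
--
--     Examples:
--         >>> is_docker_ip("172.17.0.5")
--         True
--         >>> is_docker_ip("192.168.1.100")
--         False
--     """
--     try:
--         ip_obj = ipaddress.ip_address(ip)
--
--         for cidr in DOCKER_IP_RANGES: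
--             network = ipaddress.ip_network(cidr)
--             if ip_obj in network:
--                 return True
--
--         return False
--     except ValueError:
--         return False
-- ===== SOURCE B (Python) =====
-- def _addr(ip):
--     """Single left-to-right scan of the string: one pass building the 32-bit
--     address value, or None if the string is not a valid dotted-quad IPv4
--     address (same grammar as ipaddress: 4 octets, <=3 ASCII digits each,
--     no leading zeros, each <= 255)."""
--     octets = 0
--     n = 0
--     val = 0
--     digits = 0
--     lead0 = False
--     for ch in ip:
--         if '0' <= ch <= '9':
--             if digits == 0:
--                 val = ord(ch) - 48
--                 digits = 1
--                 lead0 = ch == '0'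
--             elif lead0:
--                 return None
--             elif digits == 3:
--                 return None
--             elif val * 10 + (ord(ch) - 48) > 255:
--                 return None
--             else:
--                 val = val * 10 + (ord(ch) - 48)
--                 digits += 1
--         elif ch == '.':
--             if digits == 0 or octets == 3:
--                 return None
--             n = n * 256 + val
--             val = 0
--             digits = 0
--             octets += 1
--         else:
--             return None
--     if digits == 0 or octets != 3:
--         return None
--     return n * 256 + val
--
--
-- def is_docker_ip(ip: str) -> bool:
--     """One scan plus two constant integer range comparisons instead of a loop
--     over 16 ip_network containment tests."""
--     n = _addr(ip)
--     if n is None: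
--         return False
--     return n >> 24 == 10 or 0xAC110000 <= n <= 0xAC1FFFFF
-- ===== Notes on version B (the rewrite author's own statement) =====
-- stated objective: simpler
-- what changed: Replaces ipaddress object construction plus a loop over 16 ip_network containment tests with a single-pass character state machine that builds the 32-bit address value and two constant integer range comparisons ((n>>24)==10 for 10.0.0.0/8, 0xAC110000..0xAC1FFFFF for the 172.17-172.31 /16 blocks).
import Mathlib
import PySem

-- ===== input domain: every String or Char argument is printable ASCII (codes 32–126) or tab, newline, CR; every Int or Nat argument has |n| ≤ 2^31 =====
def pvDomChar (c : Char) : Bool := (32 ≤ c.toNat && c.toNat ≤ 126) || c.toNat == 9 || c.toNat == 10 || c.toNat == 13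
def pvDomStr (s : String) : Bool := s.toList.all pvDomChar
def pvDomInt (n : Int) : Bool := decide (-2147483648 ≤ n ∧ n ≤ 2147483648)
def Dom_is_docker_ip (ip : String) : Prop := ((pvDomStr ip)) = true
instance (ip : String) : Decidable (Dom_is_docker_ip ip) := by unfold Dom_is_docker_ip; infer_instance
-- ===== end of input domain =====

-- B replaces A's ipaddress objects and loop over 16 ip_network containment checks
-- with a single-pass character state machine plus two constant integer range
-- comparisons (objective: simpler).


-- ===== PORT A =====
-- Hand-port of ipaddress's IPv4 string parser (_ip_int_from_string/_parse_octet),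
-- which A invokes via ipaddress.ip_address.  Exact on ASCII input (Dom): Python's
-- str.isdigit coincides with '0'..'9' there, and a valid IPv6 string (the only
-- other way ip_address returns) is contained in none of the IPv4 networks, so
-- folding it into the parse-failure branch is exact.

-- addr_str.split('.') for the single-character separator (hand port, exact:
-- Python's str.split with a one-char sep cuts at every occurrence, keeping
-- empty pieces, and ''.split('.') == ['']).
def pvSplitDot : List Char → List (List Char)
  | [] => [[]]
  | c :: cs =>
    if c = '.' then [] :: pvSplitDot cs
    else
      match pvSplitDot cs with
      | p :: ps => (c :: p) :: ps
      | [] => [[c]]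

-- _parse_octet: nonempty, ASCII digits only, at most 3 digits, no leading zero,
-- value <= 255.
def pvParseOctet? (cs : List Char) : Option Int :=
  if cs.isEmpty then none
  else if !cs.all (fun c => decide ('0' ≤ c) && decide (c ≤ '9')) then none
  else if cs.length > 3 then none
  else if cs.length > 1 && cs.headI == '0' then none
  else if cs.foldl (fun a c => a * 10 + (c.toNat - 48)) 0 ≤ 255 then
    some ((cs.foldl (fun a c => a * 10 + (c.toNat - 48)) 0 : Nat) : Int)
  else none

def pvParseIPv4Chars? (cs : List Char) : Option Int :=
  match pvSplitDot cs with
  | [a, b, c, d] =>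
    match pvParseOctet? a, pvParseOctet? b, pvParseOctet? c, pvParseOctet? d with
    | some x, some y, some z, some w => some (((x * 256 + y) * 256 + z) * 256 + w)
    | _, _, _, _ => none
  | _ => none

def pvParseIPv4? (ip : String) : Option Int := pvParseIPv4Chars? ip.toList

def DOCKER_IP_RANGES : List String :=
  ["172.17.0.0/16", "172.18.0.0/16", "172.19.0.0/16", "172.20.0.0/16",
   "172.21.0.0/16", "172.22.0.0/16", "172.23.0.0/16", "172.24.0.0/16",
   "172.25.0.0/16", "172.26.0.0/16", "172.27.0.0/16", "172.28.0.0/16",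
   "172.29.0.0/16", "172.30.0.0/16", "172.31.0.0/16", "10.0.0.0/8"]

-- ip_network(cidr) for the module's literal CIDRs; exact for them (all have a
-- valid base address, prefix 0..32 and no host bits set).
def pvParseNet? (cidr : String) : Option (Int × Nat) :=
  match PySem.Chars.splitOn cidr.toList ['/'] with
  | [a, p] =>
    match pvParseIPv4Chars? a, PySem.Int.ofChars? p with
    | some base, some pr => some (base, pr.toNat)
    | _, _ => none
  | _ => none

-- 'ip_obj in network': network_address ≤ ip ≤ broadcast_address.
def pvNetContains (cidr : String) (n : Int) : Bool :=
  match pvParseNet? cidr with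
  | some (base, pr) => decide (base ≤ n ∧ n ≤ base + (2 ^ (32 - pr) - 1))
  | none => false

-- A: try ip_address(ip); loop over DOCKER_IP_RANGES returning True on the first
-- containing network, else False; ValueError → False.
def is_docker_ip (ip : String) : Bool :=
  match pvParseIPv4? ip with
  | none => false
  | some n => DOCKER_IP_RANGES.any (fun cidr => pvNetContains cidr n)

-- ===== PORT B =====
-- B's _addr: one left-to-right scan over the characters with state
-- (octets done, accumulated address n, current octet value, digit count,
-- leading-zero flag); the for-loop with early returns becomes this recursion.
def pvScan : List Char → Nat → Int → Int → Nat → Bool → Option Int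
  | [], octets, n, val, digits, _ =>
    if digits = 0 ∨ octets ≠ 3 then none else some (n * 256 + val)
  | c :: cs, octets, n, val, digits, lead0 =>
    if '0' ≤ c ∧ c ≤ '9' then
      if digits = 0 then pvScan cs octets n ((c.toNat : Int) - 48) 1 (c == '0')
      else if lead0 then none
      else if digits = 3 then none
      else if val * 10 + ((c.toNat : Int) - 48) > 255 then none
      else pvScan cs octets n (val * 10 + ((c.toNat : Int) - 48)) (digits + 1) lead0
    else if c = '.' then
      if digits = 0 ∨ octets = 3 then none
      else pvScan cs (octets + 1) (n * 256 + val) 0 0 false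
    else none

def is_docker_ip_alt (ip : String) : Bool :=
  match pvScan ip.toList 0 0 0 0 false with
  | none => false
  | some n =>
    decide (PySem.Int.floordiv n 16777216 = 10) ||
      (decide (0xAC110000 ≤ n) && decide (n ≤ 0xAC1FFFFF))

-- ===== PRECONDITION & SPEC =====
def Spec_is_docker_ip (ip : String) (out : Bool) : Prop := out = is_docker_ip_alt ip
instance (ip : String) (out : Bool) : Decidable (Spec_is_docker_ip ip out) := by unfold Spec_is_docker_ip; infer_instance

-- ===== CLAIM (what is proved, stated in full; the proofs are below) =====
def Claim_equal_is_docker_ip : Prop := ∀ (ip : String), Dom_is_docker_ip ip → Spec_is_docker_ip ip (is_docker_ip ip)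

-- ===== LEMMAS AND PROOFS =====

-- The octet-level continuation of B's scanner, isolated for the proof.
def octCont : Int → Nat → Bool → List Char → Option Int
  | val, digits, _, [] => if digits = 0 then none else some val
  | val, digits, lead0, c :: cs =>
    if '0' ≤ c ∧ c ≤ '9' then
      if digits = 0 then octCont ((c.toNat : Int) - 48) 1 (c == '0') cs
      else if lead0 then none
      else if digits = 3 then none
      else if val * 10 + ((c.toNat : Int) - 48) > 255 then none
      else octCont (val * 10 + ((c.toNat : Int) - 48)) (digits + 1) lead0 cs
    else none

-- What B's scanner computes, phrased over the dot-split of the remaining input.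
def specTop : Nat → Int → Int → Nat → Bool → List (List Char) → Option Int
  | _, _, _, _, _, [] => none
  | octets, n, val, digits, lead0, [p] =>
    match octCont val digits lead0 p with
    | some v => if octets = 3 then some (n * 256 + v) else none
    | none => none
  | octets, n, val, digits, lead0, p :: q :: ps =>
    match octCont val digits lead0 p with
    | some v => if octets = 3 then none else specTop (octets + 1) (n * 256 + v) 0 0 false (q :: ps)
    | none => none

theorem pvSplitDot_ne_nil (cs : List Char) : pvSplitDot cs ≠ [] := by
  induction cs with
  | nil => simp [pvSplitDot]
  | cons c cs ih =>
    by_cases hc : c = '.'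
    · simp [pvSplitDot, hc]
    · simp only [pvSplitDot, if_neg hc]
      cases h : pvSplitDot cs <;> simp

theorem specTop_cons (octets : Nat) (n val : Int) (digits : Nat) (lead0 : Bool)
    (c : Char) (p : List Char) (ps : List (List Char)) :
    specTop octets n val digits lead0 ((c :: p) :: ps) =
      (if '0' ≤ c ∧ c ≤ '9' then
        if digits = 0 then specTop octets n ((c.toNat : Int) - 48) 1 (c == '0') (p :: ps)
        else if lead0 then none
        else if digits = 3 then none
        else if val * 10 + ((c.toNat : Int) - 48) > 255 then none
        else specTop octets n (val * 10 + ((c.toNat : Int) - 48)) (digits + 1) lead0 (p :: ps)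
      else none) := by
  cases ps with
  | nil => simp only [specTop, octCont]; split_ifs <;> rfl
  | cons q qs => simp only [specTop, octCont]; split_ifs <;> rfl

theorem specTop_nilpart (octets : Nat) (n val : Int) (digits : Nat) (lead0 : Bool)
    (p : List Char) (ps : List (List Char)) :
    specTop octets n val digits lead0 ([] :: p :: ps) =
      (if digits = 0 then none
       else if octets = 3 then none
       else specTop (octets + 1) (n * 256 + val) 0 0 false (p :: ps)) := by
  simp only [specTop, octCont]; split_ifs <;> rfl

theorem pvScan_eq_specTop (cs : List Char) :
    ∀ octets n val digits lead0,
      pvScan cs octets n val digits lead0 =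
        specTop octets n val digits lead0 (pvSplitDot cs) := by
  induction cs with
  | nil =>
    intro octets n val digits lead0
    simp only [pvScan, pvSplitDot, specTop, octCont]
    by_cases hd : digits = 0
    · simp [hd]
    · by_cases ho : octets = 3 <;> simp [hd, ho]
  | cons c cs ih =>
    intro octets n val digits lead0
    by_cases hdot : c = '.'
    · subst hdot
      have hnd : ¬('0' ≤ '.' ∧ '.' ≤ '9') := by decide
      obtain ⟨p, ps, h⟩ : ∃ p ps, pvSplitDot cs = p :: ps := by
        cases h : pvSplitDot cs with
        | nil => exact absurd h (pvSplitDot_ne_nil cs)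
        | cons p ps => exact ⟨p, ps, rfl⟩
      simp only [pvScan, pvSplitDot, if_neg hnd, h, reduceIte]
      rw [show ∀ o nn v d l, specTop o nn v d l ([] :: p :: ps) =
        (if d = 0 then none
         else if o = 3 then none
         else specTop (o + 1) (nn * 256 + v) 0 0 false (p :: ps)) from
        fun o nn v d l => specTop_nilpart o nn v d l p ps]
      by_cases hd : digits = 0
      · simp [hd]
      · by_cases ho : octets = 3
        · simp [hd, ho]
        · simp [hd, ho, ih, h]
    · obtain ⟨p, ps, h⟩ : ∃ p ps, pvSplitDot cs = p :: ps := by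
        cases h : pvSplitDot cs with
        | nil => exact absurd h (pvSplitDot_ne_nil cs)
        | cons p ps => exact ⟨p, ps, rfl⟩
      have hsplit : pvSplitDot (c :: cs) = (c :: p) :: ps := by
        simp [pvSplitDot, if_neg hdot, h]
      rw [hsplit, specTop_cons]
      simp only [pvScan]
      split_ifs <;> (try rfl) <;> rw [ih, h]

theorem foldl_digits_le (cs : List Char) :
    ∀ a : Nat, a ≤ cs.foldl (fun a c => a * 10 + (c.toNat - 48)) a := by
  induction cs with
  | nil => intro a; simp
  | cons c cs ih =>
    intro a
    simp only [List.foldl_cons]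
    calc a ≤ a * 10 + (c.toNat - 48) := by omega
      _ ≤ _ := ih _

theorem octCont_mid (rest : List Char) :
    ∀ pre : List Char, pre ≠ [] →
      pre.all (fun c => decide ('0' ≤ c) && decide (c ≤ '9')) = true →
      pre.length ≤ 3 →
      ¬(1 < pre.length ∧ pre.headI = '0') →
      (pre.foldl (fun a c => a * 10 + (c.toNat - 48)) 0 : Nat) ≤ 255 →
      octCont ((pre.foldl (fun a c => a * 10 + (c.toNat - 48)) 0 : Nat) : Int)
          pre.length (pre.headI == '0') rest = pvParseOctet? (pre ++ rest) := by
  induction rest with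
  | nil =>
    intro pre hne hall hlen hlz hval
    have hd0 : pre.length ≠ 0 := by cases pre <;> simp_all
    simp only [List.append_nil, octCont, if_neg hd0]
    unfold pvParseOctet?
    rw [if_neg (by cases pre <;> simp_all),
        if_neg (by simp [hall]),
        if_neg (by omega),
        if_neg (by simp only [Bool.and_eq_true, decide_eq_true_eq, beq_iff_eq]; exact fun h => hlz h),
        if_pos hval]
  | cons c rest' ih =>
    intro pre hne hall hlen hlz hval
    have hd0 : pre.length ≠ 0 := by cases pre <;> simp_all
    have hheadI : ∀ t : List Char, (pre ++ t).headI = pre.headI := by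
      intro t; cases pre with
      | nil => exact absurd rfl hne
      | cons a b => rfl
    by_cases hc : '0' ≤ c ∧ c ≤ '9'
    · have h48 : 48 ≤ c.toNat := hc.1
      simp only [octCont, if_pos hc, if_neg hd0]
      by_cases hl0 : (pre.headI == '0') = true
      · rw [if_pos hl0]
        have hh0 : pre.headI = '0' := by simpa using hl0
        unfold pvParseOctet?
        split_ifs with g1 g2 g3 g4 g5 <;> try rfl
        exfalso
        apply g4
        simp only [Bool.and_eq_true, decide_eq_true_eq, beq_iff_eq]
        constructor
        · simp only [List.length_append, List.length_cons]; omega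
        · rw [hheadI, hh0]
      · rw [if_neg hl0]
        have hh0 : ¬ pre.headI = '0' := by simpa using hl0
        by_cases h3 : pre.length = 3
        · rw [if_pos h3]
          unfold pvParseOctet?
          split_ifs with g1 g2 g3' g4 g5 <;> try rfl
          exfalso
          apply g3'
          simp only [List.length_append, List.length_cons]; omega
        · rw [if_neg h3]
          by_cases hbig : ((pre.foldl (fun a c => a * 10 + (c.toNat - 48)) 0 : Nat) : Int) * 10 + ((c.toNat : Int) - 48) > 255
          · rw [if_pos hbig]
            unfold pvParseOctet?
            split_ifs with g1 g2 g3' g4 g5 <;> try rfl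
            exfalso
            have hstep : (pre ++ c :: rest').foldl (fun a c => a * 10 + (c.toNat - 48)) 0
                = rest'.foldl (fun a c => a * 10 + (c.toNat - 48))
                    (pre.foldl (fun a c => a * 10 + (c.toNat - 48)) 0 * 10 + (c.toNat - 48)) := by
              rw [List.foldl_append]; rfl
            have hmono := foldl_digits_le rest'
                (pre.foldl (fun a c => a * 10 + (c.toNat - 48)) 0 * 10 + (c.toNat - 48))
            rw [hstep] at g5
            omega
          · rw [if_neg hbig]
            have hcast : ((pre ++ [c]).foldl (fun a c => a * 10 + (c.toNat - 48)) 0 : Nat)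
                = pre.foldl (fun a c => a * 10 + (c.toNat - 48)) 0 * 10 + (c.toNat - 48) := by
              rw [List.foldl_append]; rfl
            have hIH := ih (pre ++ [c]) (by simp)
              (by simp only [List.all_append, List.all_cons, List.all_nil, Bool.and_eq_true,
                    decide_eq_true_eq]; exact ⟨hall, ⟨hc.1, hc.2⟩, trivial⟩)
              (by simp only [List.length_append, List.length_cons, List.length_nil]; omega)
              (by rw [List.length_append, hheadI]; simp only [List.length_cons, List.length_nil]
                  exact fun h => hh0 h.2)
              (by rw [hcast]; omega)
            rw [hcast, hheadI, List.length_append, List.append_assoc] at hIH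
            simp only [List.length_cons, List.length_nil, List.singleton_append] at hIH
            rw [← hIH]
            congr 1
            push_cast [Nat.cast_sub h48]
            ring
    · simp only [octCont, if_neg hc]
      unfold pvParseOctet?
      split_ifs with g1 g2 g3' g4 g5 <;> try rfl
      exfalso
      rw [Bool.not_eq_true', Bool.not_eq_false] at g2
      have hmem : c ∈ pre ++ c :: rest' := by simp
      have := List.all_eq_true.mp g2 c hmem
      simp only [Bool.and_eq_true, decide_eq_true_eq] at this
      exact hc this

theorem octCont_fresh (p : List Char) : octCont 0 0 false p = pvParseOctet? p := by
  cases p with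
  | nil => rfl
  | cons c rest =>
    by_cases hc : '0' ≤ c ∧ c ≤ '9'
    · have h48 : 48 ≤ c.toNat ∧ c.toNat ≤ 57 := by
        obtain ⟨h1, h2⟩ := hc
        exact ⟨h1, h2⟩
      have hmid := octCont_mid rest [c] (by simp)
        (by simp [hc.1, hc.2]) (by simp) (by simp) (by simp; omega)
      simp only [List.foldl_cons, List.foldl_nil, List.length_cons, List.length_nil,
        List.headI, List.singleton_append] at hmid
      rw [show ((0 * 10 + (c.toNat - 48) : Nat) : Int) = (c.toNat : Int) - 48 from by omega] at hmid
      simpa [octCont, if_pos hc] using hmid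
    · simp only [octCont, if_neg hc]
      unfold pvParseOctet?
      split_ifs with g1 g2 g3' g4 g5 <;> try rfl
      exfalso
      rw [Bool.not_eq_true', Bool.not_eq_false] at g2
      have := List.all_eq_true.mp g2 c (by simp)
      simp only [Bool.and_eq_true, decide_eq_true_eq] at this
      exact hc this

theorem specTop_split (cs : List Char) :
    specTop 0 0 0 0 false (pvSplitDot cs) = pvParseIPv4Chars? cs := by
  unfold pvParseIPv4Chars?
  generalize pvSplitDot cs = parts
  rcases parts with _ | ⟨a, _ | ⟨b, _ | ⟨c, _ | ⟨d, _ | ⟨e, ps⟩⟩⟩⟩⟩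
  · rfl
  · cases ha : pvParseOctet? a <;> simp [specTop, octCont_fresh, ha]
  · cases ha : pvParseOctet? a <;> cases hb : pvParseOctet? b <;>
      simp [specTop, octCont_fresh, ha, hb]
  · cases ha : pvParseOctet? a <;> cases hb : pvParseOctet? b <;>
      cases hc : pvParseOctet? c <;> simp [specTop, octCont_fresh, ha, hb, hc]
  · cases ha : pvParseOctet? a <;> cases hb : pvParseOctet? b <;>
      cases hc : pvParseOctet? c <;> cases hd : pvParseOctet? d <;>
      simp [specTop, octCont_fresh, ha, hb, hc, hd, mul_comm]
  · cases ha : pvParseOctet? a <;> cases hb : pvParseOctet? b <;>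
      cases hc : pvParseOctet? c <;> cases hd : pvParseOctet? d <;>
      simp [specTop, octCont_fresh, ha, hb, hc, hd]

theorem pvParseOctet?_bounds {cs : List Char} {v : Int}
    (h : pvParseOctet? cs = some v) : 0 ≤ v ∧ v ≤ 255 := by
  unfold pvParseOctet? at h
  split_ifs at h with h1 h2 h3 h4 h5
  simp only [Option.some.injEq] at h
  subst h
  constructor
  · positivity
  · exact_mod_cast h5

theorem pvParseIPv4?_bounds {ip : String} {n : Int}
    (h : pvParseIPv4? ip = some n) : 0 ≤ n ∧ n < 4294967296 := by
  unfold pvParseIPv4? pvParseIPv4Chars? at h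
  split at h
  case _ a b c d _ =>
    split at h
    case _ x y z w hx hy hz hw =>
      simp only [Option.some.injEq] at h
      obtain ⟨hx0, hx1⟩ := pvParseOctet?_bounds hx
      obtain ⟨hy0, hy1⟩ := pvParseOctet?_bounds hy
      obtain ⟨hz0, hz1⟩ := pvParseOctet?_bounds hz
      obtain ⟨hw0, hw1⟩ := pvParseOctet?_bounds hw
      omega
    case _ => exact absurd h (by simp_all)
  case _ => exact absurd h (by simp)

theorem pv_any_eq (n : Int) (h0 : 0 ≤ n) (h1 : n < 4294967296) :
    (DOCKER_IP_RANGES.any (fun cidr => pvNetContains cidr n)) =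
      (decide (PySem.Int.floordiv n 16777216 = 10) ||
        (decide (0xAC110000 ≤ n) && decide (n ≤ 0xAC1FFFFF))) := by
  have hfd : PySem.Int.floordiv n 16777216 = n / 16777216 :=
    PySem.Int.floordiv_eq_ediv_of_pos (by norm_num)
  have e17 : pvParseNet? "172.17.0.0/16" = some (2886795264, 16) := by decide
  have e18 : pvParseNet? "172.18.0.0/16" = some (2886860800, 16) := by decide
  have e19 : pvParseNet? "172.19.0.0/16" = some (2886926336, 16) := by decide
  have e20 : pvParseNet? "172.20.0.0/16" = some (2886991872, 16) := by decide
  have e21 : pvParseNet? "172.21.0.0/16" = some (2887057408, 16) := by decide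
  have e22 : pvParseNet? "172.22.0.0/16" = some (2887122944, 16) := by decide
  have e23 : pvParseNet? "172.23.0.0/16" = some (2887188480, 16) := by decide
  have e24 : pvParseNet? "172.24.0.0/16" = some (2887254016, 16) := by decide
  have e25 : pvParseNet? "172.25.0.0/16" = some (2887319552, 16) := by decide
  have e26 : pvParseNet? "172.26.0.0/16" = some (2887385088, 16) := by decide
  have e27 : pvParseNet? "172.27.0.0/16" = some (2887450624, 16) := by decide
  have e28 : pvParseNet? "172.28.0.0/16" = some (2887516160, 16) := by decide
  have e29 : pvParseNet? "172.29.0.0/16" = some (2887581696, 16) := by decide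
  have e30 : pvParseNet? "172.30.0.0/16" = some (2887647232, 16) := by decide
  have e31 : pvParseNet? "172.31.0.0/16" = some (2887712768, 16) := by decide
  have e10 : pvParseNet? "10.0.0.0/8" = some (167772160, 8) := by decide
  simp only [DOCKER_IP_RANGES, List.any_cons, List.any_nil, pvNetContains,
    e17, e18, e19, e20, e21, e22, e23, e24, e25, e26, e27, e28, e29, e30, e31, e10,
    hfd, Bool.or_false]
  rw [Bool.eq_iff_iff]
  simp only [Bool.or_eq_true, Bool.and_eq_true, decide_eq_true_eq]
  omega

-- ===== VERDICT (by name: the statement is the Claim_ definition above) =====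
theorem is_docker_ip_spec : Claim_equal_is_docker_ip := by
  intro ip _
  unfold Spec_is_docker_ip is_docker_ip is_docker_ip_alt
  have hscan : pvScan ip.toList 0 0 0 0 false = pvParseIPv4? ip := by
    rw [pvScan_eq_specTop, specTop_split]
    rfl
  rw [hscan]
  cases h : pvParseIPv4? ip with
  | none => rfl
  | some n =>
    obtain ⟨h0, h1⟩ := pvParseIPv4?_bounds h
    exact pv_any_eq n h0 h1
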